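-- pv_equiv track=rewrite | github.com/irenezhengg/111-1-Programming | Week10/030.py | terbaikDanTerburuk
-- ===== SOURCE A (Python) =====
-- def terbaikDanTerburuk(daftar_kata_sandi):
--     atas = daftar_kata_sandi[0]
--     bawah = daftar_kata_sandi[0]
--
--     for kataSandi in daftar_kata_sandi:
--         if kataSandi[0] > atas[0]:
--             atas = kataSandi
--
--         if kataSandi[0] < bawah[0]:
--             bawah = kataSandi
--
--     return atas, bawah
-- ===== SOURCE B (Python) =====
-- def terbaikDanTerburuk(daftar_kata_sandi):
--     menurun = sorted(daftar_kata_sandi, key=lambda k: k[0], reverse=True)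
--     menaik = sorted(daftar_kata_sandi, key=lambda k: k[0])
--     return menurun[0], menaik[0]
-- ===== Notes on version B (the rewrite author's own statement) =====
-- stated objective: alternative
-- what changed: Replaces the single running best/worst scan by sort-then-pick: two stable sorts by the first element (descending and ascending) whose heads are, by stability, exactly the first maximal and first minimal passwords that A's strict comparisons keep.
import Mathlib
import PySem

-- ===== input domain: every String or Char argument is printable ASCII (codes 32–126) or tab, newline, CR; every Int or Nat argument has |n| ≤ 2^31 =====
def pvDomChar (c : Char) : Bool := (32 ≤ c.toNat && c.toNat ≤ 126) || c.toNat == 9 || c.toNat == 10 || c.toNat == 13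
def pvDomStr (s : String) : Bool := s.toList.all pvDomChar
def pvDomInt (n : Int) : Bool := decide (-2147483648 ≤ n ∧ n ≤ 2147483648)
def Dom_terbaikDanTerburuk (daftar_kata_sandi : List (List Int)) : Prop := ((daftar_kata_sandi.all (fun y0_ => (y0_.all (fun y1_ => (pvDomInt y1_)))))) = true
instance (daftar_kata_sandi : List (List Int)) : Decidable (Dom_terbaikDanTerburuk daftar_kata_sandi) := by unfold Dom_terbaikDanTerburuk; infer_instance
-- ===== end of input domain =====

-- B replaces A's single running best/worst scan by sort-then-pick: two stable sorts by
-- the first element (descending / ascending) whose heads are the answers; O(n log n)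
-- instead of O(n), chosen as a genuinely different algorithm, not for speed.

-- key k = k[0]; the getD 0 default is never used inside Pre_ (all inner lists nonempty),
-- where PySem.List.pyGet? l 0 = some l[0] exactly as in Python.
def pvKey (l : List Int) : Int := (PySem.List.pyGet? l 0).getD 0

-- ===== PORT A =====
def terbaikDanTerburuk (daftar_kata_sandi : List (List Int)) : List Int × List Int :=
  match PySem.List.pyGet? daftar_kata_sandi 0 with
  | none => ([], [])  -- daftar_kata_sandi[0]: IndexError, excluded by Pre_
  | some first =>
    daftar_kata_sandi.foldl
      (fun (st : List Int × List Int) kataSandi =>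
        let atas := if pvKey st.1 < pvKey kataSandi then kataSandi else st.1
        let bawah := if pvKey kataSandi < pvKey st.2 then kataSandi else st.2
        (atas, bawah))
      (first, first)

-- ===== PORT B =====
-- menurun[0] / menaik[0]: on the empty list Python raises IndexError (excluded by Pre_);
-- the .getD [] default is never used inside Pre_.
def terbaikDanTerburuk_alt (daftar_kata_sandi : List (List Int)) : List Int × List Int :=
  let menurun := PySem.List.sorted daftar_kata_sandi pvKey true
  let menaik := PySem.List.sorted daftar_kata_sandi pvKey false
  ((PySem.List.pyGet? menurun 0).getD [], (PySem.List.pyGet? menaik 0).getD [])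

-- ===== PRECONDITION & SPEC =====
-- Pre_: exactly where Python A returns — the list is nonempty (else daftar_kata_sandi[0]
-- raises IndexError) and every password is nonempty (else kataSandi[0] raises IndexError).
def Pre_terbaikDanTerburuk (daftar_kata_sandi : List (List Int)) : Prop :=
  daftar_kata_sandi ≠ [] ∧ ∀ l ∈ daftar_kata_sandi, l ≠ []
instance (daftar_kata_sandi : List (List Int)) : Decidable (Pre_terbaikDanTerburuk daftar_kata_sandi) := by unfold Pre_terbaikDanTerburuk; infer_instance

def pvWitness_terbaikDanTerburuk : List (List Int) := [[3, 4], [1], [5, 2]]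

def Spec_terbaikDanTerburuk (daftar_kata_sandi : List (List Int)) (out : List Int × List Int) : Prop := out = terbaikDanTerburuk_alt daftar_kata_sandi
instance (daftar_kata_sandi : List (List Int)) (out : List Int × List Int) : Decidable (Spec_terbaikDanTerburuk daftar_kata_sandi out) := by unfold Spec_terbaikDanTerburuk; infer_instance

-- ===== CLAIM (what is proved, stated in full; the proofs are below) =====
def Claim_equal_terbaikDanTerburuk : Prop := ∀ (daftar_kata_sandi : List (List Int)), Dom_terbaikDanTerburuk daftar_kata_sandi → Pre_terbaikDanTerburuk daftar_kata_sandi → Spec_terbaikDanTerburuk daftar_kata_sandi (terbaikDanTerburuk daftar_kata_sandi)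

-- ===== LEMMAS AND PROOFS =====

-- A's combined loop over t starting at (a, b) is the pair of two independent
-- running-extremum loops.
theorem pvFold_split (t : List (List Int)) (a b : List Int) :
    t.foldl
      (fun (st : List Int × List Int) kataSandi =>
        let atas := if pvKey st.1 < pvKey kataSandi then kataSandi else st.1
        let bawah := if pvKey kataSandi < pvKey st.2 then kataSandi else st.2
        (atas, bawah))
      (a, b)
    = (t.foldl (fun m x => if pvKey m < pvKey x then x else m) a,
       t.foldl (fun m x => if pvKey x < pvKey m then x else m) b) := by
  induction t generalizing a b with
  | nil => rfl
  | cons h t ih => simp only [List.foldl_cons]; exact ih _ _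

-- Head of insertion sort: inserting x into a nonempty accumulator keeps the head
-- unless x must go before it, so the head of the whole foldl is itself a running fold.
theorem pvHead_foldl_insertBy {α : Type} (before : α → α → Bool) (xs : List α)
    (m : α) (t : List α) :
    (xs.foldl (fun acc x => PySem.List.insertBy before x acc) (m :: t)).head?
      = some (xs.foldl (fun h x => if before x h then x else h) m) := by
  induction xs generalizing m t with
  | nil => rfl
  | cons x xs ih =>
    simp only [List.foldl_cons]
    by_cases hc : before x m
    · rw [show PySem.List.insertBy before x (m :: t) = x :: m :: t from by
        simp [PySem.List.insertBy, hc]]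
      rw [ih x (m :: t)]; simp [hc]
    · rw [show PySem.List.insertBy before x (m :: t)
            = m :: PySem.List.insertBy before x t from by
        simp [PySem.List.insertBy, hc]]
      rw [ih m _]; simp [hc]

-- Head of sorted(reverse=True): the first element attaining the maximal key.
theorem pvHead_sorted_rev (h : List Int) (t : List (List Int)) :
    (PySem.List.sorted (h :: t) pvKey true).head?
      = some (t.foldl (fun m x => if pvKey m < pvKey x then x else m) h) := by
  rw [PySem.List.sorted_rev_eq_foldl_insertBy]
  simp only [List.foldl_cons, PySem.List.insertBy]
  rw [pvHead_foldl_insertBy]; simp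

-- Head of sorted(): the first element attaining the minimal key.
theorem pvHead_sorted (h : List Int) (t : List (List Int)) :
    (PySem.List.sorted (h :: t) pvKey false).head?
      = some (t.foldl (fun m x => if pvKey x < pvKey m then x else m) h) := by
  rw [PySem.List.sorted_eq_foldl_insertBy]
  simp only [List.foldl_cons, PySem.List.insertBy]
  rw [pvHead_foldl_insertBy]; simp

theorem pvGet0_eq_head? {α : Type} (l : List α) :
    PySem.List.pyGet? l (0 : Int) = l.head? := by
  cases l <;> simp [PySem.List.pyGet?, PySem.List.pyIdx?]

-- ===== VERDICT (by name: the statement is the Claim_ definition above) =====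
theorem terbaikDanTerburuk_spec : Claim_equal_terbaikDanTerburuk := by
  intro d _ hpre
  obtain ⟨hne, -⟩ := hpre
  match d, hne with
  | h :: t, _ =>
    show terbaikDanTerburuk (h :: t) = terbaikDanTerburuk_alt (h :: t)
    have hg : PySem.List.pyGet? (h :: t) (0 : Int) = some h := by
      simp [PySem.List.pyGet?, PySem.List.pyIdx?]
    unfold terbaikDanTerburuk terbaikDanTerburuk_alt
    rw [hg]
    simp only [List.foldl_cons]
    rw [pvFold_split]
    rw [pvGet0_eq_head?, pvGet0_eq_head?, pvHead_sorted_rev, pvHead_sorted]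
    simp
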